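-- pv_equiv track=rewrite | github.com/MrGorillaz/Adv3nt0fC0d3 | day9/day9_1.py | build_diffs
-- ===== SOURCE A (Python) =====
-- def build_diffs (data,row):
--
--     temp_dataset = {}
--     temp_list = []
--     temp = []
--
--     for num in range(len(data)-1):
--         diff = int(data[num+1]) - int(data[num])
--         temp_list.append(diff)
--
--     for elem in temp_list:
--         if elem != 0:
--             temp = build_diffs(temp_list,row+1)
--             temp_dataset.update(temp)
--             break
--     temp_dataset.update({str(row):temp_list})
--     return temp_dataset
-- ===== SOURCE B (Python) =====
-- def build_diffs(data, row):
--     # Iterative version: collect successive difference rows in a list, then emit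
--     # one dict keyed deepest-row-first (matching the recursive merge order).
--     def diffs(x):
--         return [int(x[i + 1]) - int(x[i]) for i in range(len(x) - 1)]
--     rows = [diffs(data)]
--     while any(e != 0 for e in rows[-1]):
--         rows.append(diffs(rows[-1]))
--     return {str(row + i): rows[i] for i in reversed(range(len(rows)))}
-- ===== Notes on version B (the rewrite author's own statement) =====
-- stated objective: simpler
-- what changed: Replaces A's recursion with dict-merging (update of the recursive result, then inserting the current row) by an iterative loop that collects the successive difference rows in a list and emits them through a single reversed dict comprehension.
import Mathlib
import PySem

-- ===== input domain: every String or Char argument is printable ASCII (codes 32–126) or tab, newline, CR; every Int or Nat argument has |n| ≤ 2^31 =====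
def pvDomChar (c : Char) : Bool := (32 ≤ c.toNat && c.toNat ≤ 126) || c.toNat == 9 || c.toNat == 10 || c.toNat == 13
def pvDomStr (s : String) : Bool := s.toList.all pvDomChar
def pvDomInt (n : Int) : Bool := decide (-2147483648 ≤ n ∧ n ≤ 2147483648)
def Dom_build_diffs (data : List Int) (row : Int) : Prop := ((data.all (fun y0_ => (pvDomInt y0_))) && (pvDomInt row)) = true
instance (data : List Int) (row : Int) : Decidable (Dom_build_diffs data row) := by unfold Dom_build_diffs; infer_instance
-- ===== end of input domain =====

-- B replaces A's recursion-plus-dict-merge by an iterative collection of difference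
-- rows emitted through one reversed dict comprehension (objective: simpler; same cost).

-- ===== PORT A =====
-- helper: the first for-loop of A building temp_list (indices num+1, num are in range,
-- so pyGet? is some; .getD 0 only discharges the option)
def tempListA (data : List Int) : List Int :=
  (List.range (data.length - 1)).foldl
    (fun (acc : List Int) (num : ℕ) =>
      acc ++ [((PySem.List.pyGet? data ((num : Int) + 1)).getD 0)
               - ((PySem.List.pyGet? data (num : Int)).getD 0)]) []

-- cited by the port's decreasing_by (and by the A=B proof): the append loop is a map
theorem foldl_append_singleton {α : Type} (f : α → Int) :
    ∀ (l : List α) (acc : List Int),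
      l.foldl (fun a n => a ++ [f n]) acc = acc ++ l.map f := by
  intro l
  induction l with
  | nil => intro acc; simp
  | cons x xs ih => intro acc; simp [ih]

theorem tempListA_length (data : List Int) :
    (tempListA data).length = data.length - 1 := by
  unfold tempListA
  rw [foldl_append_singleton]
  simp

-- A's recursion: dict = (recursive result if some diff ≠ 0, else {}) updated with {str(row): temp_list}
def buildDiffsD (data : List Int) (row : Int) : PySem.Dict String (List Int) :=
  if h : (tempListA data).any (fun e => e != 0) then
    -- temp_dataset.update(temp) on the empty temp_dataset copies temp; then .update({str(row): temp_list})
    (buildDiffsD (tempListA data) (row + 1)).insert (PySem.Int.toStr row) (tempListA data)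
  else
    (PySem.Dict.empty).insert (PySem.Int.toStr row) (tempListA data)
termination_by data.length
decreasing_by
  have hne : tempListA data ≠ [] := by
    intro hnil; rw [hnil] at h; simp at h
  have hlen := tempListA_length data
  have : 0 < (tempListA data).length := List.length_pos_iff.mpr hne
  omega

def build_diffs (data : List Int) (row : Int) : List (String × List Int) :=
  (buildDiffsD data row).items

-- ===== PORT B =====
-- the diffs(x) comprehension of Source B (indices in range; .getD 0 discharges the option)
def diffsB (x : List Int) : List Int :=
  (List.range (x.length - 1)).map
    (fun (i : ℕ) => ((PySem.List.pyGet? x ((i : Int) + 1)).getD 0)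
               - ((PySem.List.pyGet? x (i : Int)).getD 0))

-- cited by collectRows' decreasing_by
theorem diffsB_length (x : List Int) : (diffsB x).length = x.length - 1 := by
  simp [diffsB]

-- Source B's while loop: rows = [current]; while any(e != 0 for e in rows[-1]): append diffs(rows[-1])
def collectRows (current : List Int) : List (List Int) :=
  if current.any (fun e => e != 0) then current :: collectRows (diffsB current)
  else [current]
termination_by current.length
decreasing_by
  have hne : current ≠ [] := by
    rename_i h; intro hnil; rw [hnil] at h; simp at h
  have : 0 < current.length := List.length_pos_iff.mpr hne
  have := diffsB_length current
  omega

-- the final dict comprehension over reversed(range(len(rows)))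
def buildAltD (data : List Int) (row : Int) : PySem.Dict String (List Int) :=
  (List.range (collectRows (diffsB data)).length).reverse.foldl
    (fun (d : PySem.Dict String (List Int)) (i : ℕ) =>
      d.insert (PySem.Int.toStr (row + (i : Int)))
               ((collectRows (diffsB data)).getD i []))
    PySem.Dict.empty

def build_diffs_alt (data : List Int) (row : Int) : List (String × List Int) :=
  (buildAltD data row).items

-- ===== PRECONDITION & SPEC =====
def Spec_build_diffs (data : List Int) (row : Int) (out : List (String × List Int)) : Prop := out = build_diffs_alt data row
instance (data : List Int) (row : Int) (out : List (String × List Int)) : Decidable (Spec_build_diffs data row out) := by unfold Spec_build_diffs; infer_instance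

-- ===== CLAIM (what is proved, stated in full; the proofs are below) =====
def Claim_equal_build_diffs : Prop := ∀ (data : List Int) (row : Int), Dom_build_diffs data row → Spec_build_diffs data row (build_diffs data row)

-- ===== LEMMAS AND PROOFS =====

-- A's loop-built temp_list is B's diffs row
theorem tempListA_eq_diffsB (data : List Int) : tempListA data = diffsB data := by
  unfold tempListA diffsB
  rw [foldl_append_singleton]
  simp

-- the reversed-range fold over an explicit rows list
def rowsFold (rows : List (List Int)) (row : Int) : PySem.Dict String (List Int) :=
  (List.range rows.length).reverse.foldl
    (fun (d : PySem.Dict String (List Int)) (i : ℕ) =>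
      d.insert (PySem.Int.toStr (row + (i : Int))) (rows.getD i []))
    PySem.Dict.empty

theorem rowsFold_cons (t : List Int) (rs : List (List Int)) (row : Int) :
    rowsFold (t :: rs) row = (rowsFold rs (row + 1)).insert (PySem.Int.toStr row) t := by
  unfold rowsFold
  have hr := List.range_succ_eq_map (n := rs.length)
  rw [List.length_cons, hr, List.reverse_cons', List.concat_eq_append, List.foldl_append, ← List.map_reverse,
    List.foldl_map]
  have hinner := PySem.List.foldl_congr_mem
    (l := (List.range rs.length).reverse)
    (init := (PySem.Dict.empty : PySem.Dict String (List Int)))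
    (f := fun x y => x.insert (PySem.Int.toStr (row + ((Nat.succ y : ℕ) : Int))) ((t :: rs).getD (Nat.succ y) []))
    (g := fun (d : PySem.Dict String (List Int)) (i : ℕ) =>
      d.insert (PySem.Int.toStr (row + 1 + (i : Int))) (rs.getD i []))
    (by
      intro acc i _
      simp only [Nat.succ_eq_add_one, Nat.cast_add, Nat.cast_one, List.getD_cons_succ]
      rw [show row + ((i : Int) + 1) = row + 1 + (i : Int) from by ring])
  rw [hinner]
  simp

theorem buildDiffsD_eq (n : ℕ) : ∀ (data : List Int), data.length = n → ∀ (row : Int),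
    buildDiffsD data row = rowsFold (collectRows (diffsB data)) row := by
  induction n using Nat.strong_induction_on with
  | _ n ih =>
    intro data hlen row
    rw [buildDiffsD, tempListA_eq_diffsB]
    by_cases h : (diffsB data).any (fun e => e != 0)
    · rw [dif_pos h]
      rw [collectRows, if_pos h, rowsFold_cons]
      have hne : diffsB data ≠ [] := by
        intro hnil; rw [hnil] at h; simp at h
      have hpos : 0 < (diffsB data).length := List.length_pos_iff.mpr hne
      have hd := diffsB_length data
      have hlt : (diffsB data).length < n := by omega
      rw [ih _ hlt (diffsB data) rfl (row + 1)]
    · rw [dif_neg h]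
      rw [collectRows, if_neg h]
      unfold rowsFold
      simp

-- ===== VERDICT (by name: the statement is the Claim_ definition above) =====
theorem build_diffs_spec : Claim_equal_build_diffs := by
  intro data row _
  unfold Spec_build_diffs build_diffs build_diffs_alt buildAltD
  rw [buildDiffsD_eq data.length data rfl row]
  rfl
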